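-- pv_equiv track=rewrite | github.com/world137/study2 | lab2.py | isHamiltonian
-- ===== SOURCE A (Python) =====
-- def isHamiltonian(arr):
--     is_H=True
--     for i in range(len(arr)):
--         for j in range(len(arr[i])):
--             if i == j and arr[i][j] != 0:
--                 is_H=False
--             elif int(arr[i][j]) != 0 and int(arr[i][j]) != 1 :
--                 is_H=False
--             elif arr[i][j] != arr[j][i]:
--                 is_H=False
--     return is_H
-- ===== SOURCE B (Python) =====
-- def isHamiltonian(arr):
--     # Border peeling: validate the border (first row, first column, corner) of the
--     # current submatrix, then peel it off and continue on the minor.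
--     ok = True
--     sub = arr
--     while sub:
--         first = sub[0]
--         if first and first[0] != 0:
--             ok = False
--         for j in range(1, len(first)):
--             v = first[j]
--             if (v != 0 and v != 1) or v != sub[j][0]:
--                 ok = False
--         for i in range(1, len(sub)):
--             if sub[i]:
--                 v = sub[i][0]
--                 if (v != 0 and v != 1) or v != first[i]:
--                     ok = False
--         sub = [row[1:] for row in sub[1:]]
--     return ok
-- ===== Notes on version B (the rewrite author's own statement) =====
-- stated objective: alternative
-- what changed: Replaces A's row-major scan of every cell with a mutated flag and a three-way elif chain by iterative border peeling: each round validates the border of the current submatrix (corner zero, first row and first column binary and mirror-equal) and then peels off the first row and column, continuing on the minor; this trades extra O(n^3) list copying for a structurally different decomposition.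
import Mathlib
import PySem

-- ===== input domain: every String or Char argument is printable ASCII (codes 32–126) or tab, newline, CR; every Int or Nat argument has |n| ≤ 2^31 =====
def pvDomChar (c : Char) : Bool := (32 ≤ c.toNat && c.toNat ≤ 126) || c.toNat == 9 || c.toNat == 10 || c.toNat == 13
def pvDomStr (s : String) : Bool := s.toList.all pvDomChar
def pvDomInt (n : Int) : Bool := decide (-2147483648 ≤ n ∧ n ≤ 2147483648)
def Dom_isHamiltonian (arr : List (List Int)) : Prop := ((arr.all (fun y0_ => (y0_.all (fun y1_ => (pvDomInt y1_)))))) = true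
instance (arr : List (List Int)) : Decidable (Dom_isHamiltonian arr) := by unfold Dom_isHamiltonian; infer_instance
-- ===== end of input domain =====

-- B replaces A's row-major full scan (mutated flag + three-way elif chain) by iterative
-- border peeling: each round validates the border of the current submatrix and then
-- peels off its first row and column, continuing on the minor.

-- ===== PORT A =====
-- literal transliteration of A's nested for-loops over is_H; int(arr[i][j]) is the
-- identity on Int inputs and is ported as the entry itself; out-of-range arr[j][i]
-- (IndexError) is outside Pre_ below, so pyGetD's default is never the value used
def isHamiltonian (arr : List (List Int)) : Bool :=
  (PySem.List.pyRange 0 arr.length 1).foldl (fun isH i =>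
    let row := PySem.List.pyGetD arr i []
    (PySem.List.pyRange 0 row.length 1).foldl (fun isH j =>
      let aij := PySem.List.pyGetD row j 0
      if i == j && aij != 0 then false
      else if aij != 0 && aij != 1 then false
      else if aij != PySem.List.pyGetD (PySem.List.pyGetD arr j []) i 0 then false
      else isH) isH) true

-- ===== PORT B =====
-- the while-loop of Source B: one round validates the border of `sub` (corner, first row,
-- first column), then continues on the minor [row[1:] for row in sub[1:]]; the mirror
-- accesses sub[j][0] / first[i] that Python would IndexError on are outside Pre_ below,
-- so pyGetD's default is never the value used
def isHamiltonianLoop (ok : Bool) (sub : List (List Int)) : Bool :=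
  if _h : sub = [] then ok
  else
    let first := PySem.List.pyGetD sub 0 []
    let ok1 := if first != [] && PySem.List.pyGetD first 0 0 != 0 then false else ok
    let ok2 := (PySem.List.pyRange 1 first.length 1).foldl (fun ok j =>
      let v := PySem.List.pyGetD first j 0
      if (v != 0 && v != 1) || v != PySem.List.pyGetD (PySem.List.pyGetD sub j []) 0 0
      then false else ok) ok1
    let ok3 := (PySem.List.pyRange 1 sub.length 1).foldl (fun ok i =>
      let rowi := PySem.List.pyGetD sub i []
      if rowi != [] then
        let v := PySem.List.pyGetD rowi 0 0
        if (v != 0 && v != 1) || v != PySem.List.pyGetD first i 0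
        then false else ok
      else ok) ok2
    isHamiltonianLoop ok3
      ((PySem.List.slice sub (some 1) none).map (fun row => PySem.List.slice row (some 1) none))
termination_by sub.length
decreasing_by
  simp only [PySem.List.slice_from_one, List.length_map, List.length_tail]
  cases sub with
  | nil => exact absurd rfl _h
  | cons r t => simp

def isHamiltonian_alt (arr : List (List Int)) : Bool :=
  isHamiltonianLoop true arr

-- ===== PRECONDITION & SPEC =====
-- Pre_ holds exactly when the Python A returns (no exception): A raises IndexError on
-- arr[j][i] iff some off-diagonal entry arr[i][j] ∈ {0,1} has j or (j,i) out of range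
def Pre_isHamiltonian (arr : List (List Int)) : Prop :=
  ∀ i < arr.length, ∀ j < (arr.getD i []).length,
    (i ≠ j ∧ ((arr.getD i []).getD j 0 = 0 ∨ (arr.getD i []).getD j 0 = 1)) →
    (j < arr.length ∧ i < (arr.getD j []).length)
instance (arr : List (List Int)) : Decidable (Pre_isHamiltonian arr) := by
  unfold Pre_isHamiltonian; infer_instance
def pvWitness_isHamiltonian : List (List Int) := [[0, 1], [1, 0]]

def Spec_isHamiltonian (arr : List (List Int)) (out : Bool) : Prop := out = isHamiltonian_alt arr
instance (arr : List (List Int)) (out : Bool) : Decidable (Spec_isHamiltonian arr out) := by unfold Spec_isHamiltonian; infer_instance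

-- ===== CLAIM (what is proved, stated in full; the proofs are below) =====
def Claim_equal_isHamiltonian : Prop := ∀ (arr : List (List Int)), Dom_isHamiltonian arr → Pre_isHamiltonian arr → Spec_isHamiltonian arr (isHamiltonian arr)

-- ===== LEMMAS AND PROOFS =====

-- the common characterisation both ports are proved equal to: every present cell (i,j)
-- has a zero diagonal, a 0/1 value and equals its mirror (getD-defaulted, exactly as
-- both ports read entries)
def Qcell (arr : List (List Int)) (i j : Nat) : Prop :=
  (i = j → (arr.getD i []).getD j 0 = 0) ∧
  ((arr.getD i []).getD j 0 = 0 ∨ (arr.getD i []).getD j 0 = 1) ∧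
  (arr.getD i []).getD j 0 = (arr.getD j []).getD i 0

def Q (arr : List (List Int)) : Prop :=
  ∀ i, i < arr.length → ∀ j, j < (arr.getD i []).length → Qcell arr i j

-- bridge: an Int-quantified range statement (from pyRange membership) as a Nat one
lemma int_forall_nat_iff (a : Int) (ha : 0 ≤ a) (n : Nat) (P : Int → Prop) :
    (∀ i : Int, a ≤ i → i < (n : Int) → P i) ↔
    (∀ m : Nat, a ≤ (m : Int) → m < n → P (m : Int)) := by
  constructor
  · intro h m h1 h2; exact h _ h1 (by exact_mod_cast h2)
  · intro h i h1 h2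
    obtain ⟨m, rfl⟩ := Int.eq_ofNat_of_zero_le (le_trans ha h1)
    exact h m h1 (by exact_mod_cast h2)

-- A's elif chain is one guarded flag reset
lemma if_chain3 (c1 c2 c3 b : Bool) :
    (if c1 then false else if c2 then false else if c3 then false else b)
    = if (c1 || c2 || c3) then false else b := by
  cases c1 <;> cases c2 <;> cases c3 <;> simp

-- A's outer loop only conjoins the per-row results onto the flag
lemma foldl_and_all {α : Type} (l : List α) (g : α → Bool) (b : Bool) :
    l.foldl (fun acc x => acc && g x) b = (b && l.all g) := by
  induction l generalizing b with
  | nil => simp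
  | cons x t ih =>
      simp only [List.foldl_cons, List.all_cons]; rw [ih]; cases b <;> cases g x <;> simp

theorem A_iff (arr : List (List Int)) : isHamiltonian arr = true ↔ Q arr := by
  unfold isHamiltonian
  simp only [if_chain3, PySem.List.foldl_if_false_eq]
  rw [foldl_and_all]
  simp only [Bool.true_and, List.all_eq_true, PySem.List.mem_pyRange_one, and_imp,
    Bool.not_eq_true', List.any_eq_false]
  simp only [int_forall_nat_iff 0 le_rfl, PySem.List.pyGetD_natCast, Int.natCast_nonneg,
    forall_const]
  simp only [Bool.or_eq_true, Bool.and_eq_true, bne_iff_ne, ne_eq, beq_iff_eq, Nat.cast_inj,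
    not_or, not_and, not_not]
  unfold Q Qcell
  constructor
  · intro h i hi j hj
    have := h i hi j hj
    tauto
  · intro h i hi j hj
    have := h i hi j hj
    tauto

-- indexing the peeled minor reads the original matrix shifted by one
lemma tail_getD_int (l : List Int) (k : Nat) : l.tail.getD k 0 = l.getD (k + 1) 0 := by
  cases l <;> simp [List.getD]

lemma tail_getD_row (arr : List (List Int)) (k : Nat) :
    ((arr.tail.map (fun r => r.tail)).getD k []) = (arr.getD (k + 1) []).tail := by
  cases arr with
  | nil => simp [List.getD]
  | cons r t =>
      simp only [List.tail_cons, List.getD, List.getElem?_map]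
      cases h : t[k]? with
      | none => simp [h]
      | some r' => simp [h]

-- B's guarded column check is one guarded flag reset
lemma if_guard (c d b : Bool) :
    (if c then (if d then false else b) else b) = if (c && d) then false else b := by
  cases c <;> cases d <;> simp

lemma ite_false_eq_true (C : Prop) [Decidable C] (b : Bool) :
    ((if C then false else b) = true) ↔ (¬C ∧ b = true) := by
  split_ifs with h <;> simp [h]

-- Q splits into the border conditions of one peeling round plus Q of the minor
lemma Q_decomp (arr : List (List Int)) (h : arr ≠ []) :
    Q arr ↔
      ((arr.getD 0 [] = [] ∨ (arr.getD 0 []).getD 0 0 = 0) ∧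
       (∀ j : Nat, 1 ≤ j → j < (arr.getD 0 []).length →
          (((arr.getD 0 []).getD j 0 = 0 ∨ (arr.getD 0 []).getD j 0 = 1) ∧
           (arr.getD 0 []).getD j 0 = (arr.getD j []).getD 0 0)) ∧
       (∀ i : Nat, 1 ≤ i → i < arr.length →
          (arr.getD i [] = [] ∨
           (((arr.getD i []).getD 0 0 = 0 ∨ (arr.getD i []).getD 0 0 = 1) ∧
            (arr.getD i []).getD 0 0 = (arr.getD 0 []).getD i 0))) ∧
       Q (arr.tail.map (fun r => r.tail))) := by
  have hpos : 0 < arr.length := List.length_pos_iff.mpr h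
  constructor
  · intro hQ
    refine ⟨?_, ?_, ?_, ?_⟩
    · by_cases h0 : arr.getD 0 [] = []
      · exact Or.inl h0
      · exact Or.inr ((hQ 0 hpos 0 (List.length_pos_iff.mpr h0)).1 rfl)
    · intro j h1 h2
      exact ⟨(hQ 0 hpos j h2).2.1, (hQ 0 hpos j h2).2.2⟩
    · intro i h1 h2
      by_cases h0 : arr.getD i [] = []
      · exact Or.inl h0
      · exact Or.inr ⟨(hQ i h2 0 (List.length_pos_iff.mpr h0)).2.1,
          (hQ i h2 0 (List.length_pos_iff.mpr h0)).2.2⟩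
    · intro k hk l hl
      rw [List.length_map, List.length_tail] at hk
      rw [tail_getD_row, List.length_tail] at hl
      have hcell := hQ (k + 1) (by omega) (l + 1) (by omega)
      unfold Qcell at hcell ⊢
      rw [tail_getD_row, tail_getD_row, tail_getD_int, tail_getD_int]
      exact ⟨fun hkl => hcell.1 (by omega), hcell.2.1, hcell.2.2⟩
  · rintro ⟨hc, hr, hcol, hm⟩ i hi j hj
    unfold Qcell
    match i, j with
    | 0, 0 =>
        have h0 : (arr.getD 0 []).getD 0 0 = 0 := by
          rcases hc with h0 | h0
          · rw [h0] at hj; simp at hj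
          · exact h0
        exact ⟨fun _ => h0, Or.inl h0, rfl⟩
    | 0, j + 1 =>
        have := hr (j + 1) (by omega) hj
        exact ⟨fun hij => absurd hij (by omega), this.1, this.2⟩
    | i + 1, 0 =>
        have := hcol (i + 1) (by omega) hi
        rcases this with h0 | this
        · rw [h0] at hj; simp at hj
        · exact ⟨fun hij => absurd hij (by omega), this.1, this.2⟩
    | i + 1, j + 1 =>
        have := hm i (by rw [List.length_map, List.length_tail]; omega)
          j (by rw [tail_getD_row, List.length_tail]; omega)
        unfold Qcell at this
        rw [tail_getD_row, tail_getD_row, tail_getD_int, tail_getD_int] at this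
        exact ⟨fun hij => this.1 (by omega), this.2.1, this.2.2⟩

-- the peeling loop's result: the flag it was started with, conjoined with Q
lemma loop_iff (n : Nat) : ∀ (sub : List (List Int)), sub.length = n → ∀ ok : Bool,
    (isHamiltonianLoop ok sub = true ↔ (ok = true ∧ Q sub)) := by
  induction n using Nat.strong_induction_on with
  | _ n ih =>
    intro sub hlen ok
    by_cases hnil : sub = []
    · subst hnil
      rw [isHamiltonianLoop]
      simp only [dite_eq_ite, if_true]
      constructor
      · intro hok; exact ⟨hok, by intro i hi; simp at hi⟩
      · exact fun h => h.1
    · rw [isHamiltonianLoop]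
      simp only [dif_neg hnil, if_guard, PySem.List.foldl_if_false_eq,
        PySem.List.slice_from_one]
      rw [ih (sub.length - 1) (by have := List.length_pos_iff.mpr hnil; omega)
        (sub.tail.map (fun r => r.tail)) (by simp) _]
      rw [Q_decomp sub hnil]
      simp only [PySem.List.pyGetD_zero, Bool.and_eq_true, Bool.not_eq_true',
        List.any_eq_false, PySem.List.mem_pyRange_one, and_imp,
        int_forall_nat_iff 1 (by norm_num), PySem.List.pyGetD_natCast, Nat.one_le_cast]
      simp only [ite_false_eq_true, Bool.or_eq_true, Bool.and_eq_true, bne_iff_ne, ne_eq,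
        not_and, Classical.not_imp, not_not, or_iff_not_imp_left]
      tauto

-- ===== VERDICT (by name: the statement is the Claim_ definition above) =====
theorem isHamiltonian_spec : Claim_equal_isHamiltonian := by
  intro arr _ _
  unfold Spec_isHamiltonian isHamiltonian_alt
  rw [Bool.eq_iff_iff, A_iff, loop_iff arr.length arr rfl true]
  simp
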